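-- pv_equiv track=rewrite | github.com/MrBrantCode/unitest_baseline | mut_generate/mist_train_taco/taco_5175/solution.py | max_card_pairs
-- ===== SOURCE A (Python) =====
-- def max_card_pairs(N, A):
--     count = 0
--     mod = 0
--     for i in range(N):
--         b = A[i]
--         if b == 0:
--             mod = 0
--         c = b + mod
--         if not c == 0:
--             count += c // 2
--             mod = c % 2
--     return count
-- ===== SOURCE B (Python) =====
-- def max_card_pairs(N, A):
--     # Segment-at-a-time: the zeros cut A[:N] into runs of nonzero cards; each
--     # run of total s yields s // 2 pairs.  Two nested index loops: the inner
--     # one sums a run, the outer one flushes it and steps past the zero.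
--     pairs = 0
--     i = 0
--     while i < N:
--         s = 0
--         while i < N and A[i] != 0:
--             s += A[i]
--             i += 1
--         pairs += s // 2
--         i += 1
--     return pairs
-- ===== Notes on version B (the rewrite author's own statement) =====
-- stated objective: alternative
-- what changed: B replaces A's per-element carry arithmetic (a floor-divide and mod at every step) by two nested index loops: the inner loop sums one zero-delimited run of nonzero cards, the outer loop flushes run_sum // 2 pairs per run.
-- intended difference: On prefixes A[:N] where some zero-delimited run contains a -1 reached while the accumulated parity is odd (two such -1s in a run, or one and the run's total sum odd), A returns a larger count because it silently drops the -1 while its carry bit survives; B returns floor(run_sum/2) pairs per run, the intended count. — e.g. on max_card_pairs(3, [1, -1, 1]): A returns 1, B returns 0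
import Mathlib
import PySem

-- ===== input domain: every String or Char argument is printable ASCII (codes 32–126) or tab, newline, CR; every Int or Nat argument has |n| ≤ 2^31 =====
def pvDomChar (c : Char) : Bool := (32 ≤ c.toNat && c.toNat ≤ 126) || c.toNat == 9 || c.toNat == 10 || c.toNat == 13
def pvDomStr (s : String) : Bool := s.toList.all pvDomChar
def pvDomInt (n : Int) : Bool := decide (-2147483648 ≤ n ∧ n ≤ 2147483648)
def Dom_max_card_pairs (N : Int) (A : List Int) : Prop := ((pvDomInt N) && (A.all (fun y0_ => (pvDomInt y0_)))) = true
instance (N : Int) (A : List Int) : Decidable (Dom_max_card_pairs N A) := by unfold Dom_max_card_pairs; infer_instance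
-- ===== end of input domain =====

-- B sums each zero-delimited run of nonzero cards with an inner index loop and flushes
-- run_sum // 2 pairs per run in an outer loop, instead of A's per-element carry arithmetic
-- (alternative decomposition, same cost); where A's dropped -1 inflates the count, B returns
-- the intended per-run floor(sum/2) (see D_ below).

-- ===== PORT A =====
-- loop body of A for one element b = A[i]: if b == 0: mod = 0; c = b + mod; if not c == 0: ...
def pvBodyA (st : Int × Int) (b : Int) : Int × Int :=
  let mod1 := if b = 0 then 0 else st.2
  let c := b + mod1
  if ¬ c = 0 then (st.1 + PySem.Int.floordiv c 2, PySem.Int.mod c 2) else (st.1, mod1)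

def max_card_pairs (N : Int) (A : List Int) : Int :=
  ((PySem.List.pyRange 0 N 1).foldl
    (fun st i => pvBodyA st (PySem.List.pyGetD A i 0)) (0, 0)).1

-- ===== PORT B =====
-- inner loop: while i < N and A[i] != 0: s += A[i]; i += 1   (fuel only makes it total)
def pvRun (N : Int) (A : List Int) : Nat → Int → Int → Int × Int
  | 0, i, s => (s, i)
  | fuel + 1, i, s =>
    if i < N then
      let x := PySem.List.pyGetD A i 0
      if x = 0 then (s, i) else pvRun N A fuel (i + 1) (s + x)
    else (s, i)

-- outer loop: while i < N: s, i := run; pairs += s // 2; i += 1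
def pvOuter (N : Int) (A : List Int) : Nat → Int → Int → Int
  | 0, _, pairs => pairs
  | fuel + 1, i, pairs =>
    if i < N then
      let r := pvRun N A fuel i 0
      pvOuter N A fuel (r.2 + 1) (pairs + PySem.Int.floordiv r.1 2)
    else pairs

def max_card_pairs_alt (N : Int) (A : List Int) : Int :=
  pvOuter N A (N.toNat + 1) 0 0

-- ===== PRECONDITION & SPEC =====
-- Pre_ excludes exactly the inputs where A raises IndexError: N > len(A).
def Pre_max_card_pairs (N : Int) (A : List Int) : Prop := N ≤ A.length
instance (N : Int) (A : List Int) : Decidable (Pre_max_card_pairs N A) := by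
  unfold Pre_max_card_pairs; infer_instance

def pvWitness_max_card_pairs : Int × List Int := (4, [3, 0, 2, 5])

-- a run is bad when it holds ≥ 2 dropped -1s, or exactly one and an odd raw sum
def pvFlushBad (k r : Int) : Bool := decide (2 ≤ k) || (decide (k = 1) && decide (r % 2 = 1))

-- scan the zero-delimited runs of the prefix: m = parity of the processed sum, k = number of
-- -1s met at odd parity (the ones A drops), r = raw run sum
def pvBadSeg : List Int → Int → Int → Int → Bool
  | [], _, k, r => pvFlushBad k r
  | x :: t, m, k, r =>
    if x = 0 then pvFlushBad k r || pvBadSeg t 0 0 0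
    else if x = -1 ∧ m = 1 then pvBadSeg t m (k + 1) (r + x)
    else pvBadSeg t ((m + x) % 2) k (r + x)

-- On prefixes A[:N] where some zero-delimited run contains a -1 reached while the accumulated
-- parity is odd (two such -1s in a run, or one and the run's total sum odd), A returns a larger
-- count because it silently drops the -1 while its carry bit survives; B returns floor(run_sum/2)
-- pairs per run, the intended count.
def D_max_card_pairs (N : Int) (A : List Int) : Prop :=
  pvBadSeg (A.take N.toNat) 0 0 0 = true
instance (N : Int) (A : List Int) : Decidable (D_max_card_pairs N A) := by
  unfold D_max_card_pairs; infer_instance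

def Spec_max_card_pairs (N : Int) (A : List Int) (out : Int) : Prop :=
  ¬ D_max_card_pairs N A → out = max_card_pairs_alt N A
instance (N : Int) (A : List Int) (out : Int) : Decidable (Spec_max_card_pairs N A out) := by
  unfold Spec_max_card_pairs; infer_instance

def pvDiffWitness_max_card_pairs : Int × List Int := (3, [1, -1, 1])
def pvDiffWitnessOut_max_card_pairs : Int × Int := (1, 0)

-- ===== CLAIM (what is proved, stated in full; the proofs are below) =====
def Claim_unchanged_max_card_pairs : Prop := ∀ (N : Int) (A : List Int), Dom_max_card_pairs N A → Pre_max_card_pairs N A → Spec_max_card_pairs N A (max_card_pairs N A)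
def Claim_changed_max_card_pairs : Prop := Dom_max_card_pairs (pvDiffWitness_max_card_pairs.1) (pvDiffWitness_max_card_pairs.2) ∧ Pre_max_card_pairs (pvDiffWitness_max_card_pairs.1) (pvDiffWitness_max_card_pairs.2) ∧ D_max_card_pairs (pvDiffWitness_max_card_pairs.1) (pvDiffWitness_max_card_pairs.2) ∧ max_card_pairs (pvDiffWitness_max_card_pairs.1) (pvDiffWitness_max_card_pairs.2) = pvDiffWitnessOut_max_card_pairs.1 ∧ max_card_pairs_alt (pvDiffWitness_max_card_pairs.1) (pvDiffWitness_max_card_pairs.2) = pvDiffWitnessOut_max_card_pairs.2 ∧ pvDiffWitnessOut_max_card_pairs.1 ≠ pvDiffWitnessOut_max_card_pairs.2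
def Claim_exact_max_card_pairs : Prop := ∀ (N : Int) (A : List Int), Dom_max_card_pairs N A → Pre_max_card_pairs N A → D_max_card_pairs N A → max_card_pairs N A ≠ max_card_pairs_alt N A

-- ===== LEMMAS AND PROOFS =====

-- reference value: pairs harvested from L when the current run already sums to s
def pvSegVal : List Int → Int → Int
  | [], s => s / 2
  | x :: t, s => if x = 0 then s / 2 + pvSegVal t 0 else pvSegVal t (s + x)

-- surplus of A over the reference, along the same scan as pvBadSeg
def pvExtra : List Int → Int → Int → Int → Int
  | [], _, k, r => (r + k) / 2 - r / 2
  | x :: t, m, k, r =>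
    if x = 0 then ((r + k) / 2 - r / 2) + pvExtra t 0 0 0
    else if x = -1 ∧ m = 1 then pvExtra t m (k + 1) (r + x)
    else pvExtra t ((m + x) % 2) k (r + x)

-- A's fold is affine in the count component
lemma bodyA_shift (L : List Int) : ∀ (c d m : Int),
    L.foldl pvBodyA (c + d, m) = ((L.foldl pvBodyA (c, m)).1 + d, (L.foldl pvBodyA (c, m)).2) := by
  induction L with
  | nil => intro c d m; simp
  | cons x t ih =>
    intro c d m
    have hstep : pvBodyA (c + d, m) x = ((pvBodyA (c, m) x).1 + d, (pvBodyA (c, m) x).2) := by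
      simp only [pvBodyA]; split_ifs <;> simp <;> ring
    simp only [List.foldl_cons, hstep]
    rw [show ((pvBodyA (c, m) x).1 + d, (pvBodyA (c, m) x).2)
        = (((pvBodyA (c, m) x).1 + d, (pvBodyA (c, m) x).2) : Int × Int) from rfl]
    exact ih (pvBodyA (c, m) x).1 d (pvBodyA (c, m) x).2

-- core invariant: A's carry fold = reference + surplus  (k dropped -1s, raw run sum r)
lemma coreA (L : List Int) : ∀ (c k r : Int), 0 ≤ k →
    (L.foldl pvBodyA (c + (r + k) / 2, (r + k) % 2)).1
      = c + pvSegVal L r + pvExtra L ((r + k) % 2) k r := by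
  induction L with
  | nil =>
    intro c k r hk
    simp only [List.foldl_nil, pvSegVal, pvExtra]; ring
  | cons x t ih =>
    intro c k r hk
    have fd : ∀ a : Int, PySem.Int.floordiv a 2 = a / 2 := fun a =>
      PySem.Int.floordiv_eq_ediv_of_pos (a := a) (by omega)
    have md : ∀ a : Int, PySem.Int.mod a 2 = a % 2 := fun a =>
      PySem.Int.mod_eq_emod_of_pos (a := a) (by omega)
    by_cases h0 : x = 0
    · subst h0
      have hA0 : ∀ (cc m : Int), pvBodyA (cc, m) 0 = (cc, 0) := by
        intro cc m; simp [pvBodyA]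
      simp only [List.foldl_cons, hA0]
      rw [show c + (r + k) / 2 = (c + r / 2) + ((r + k) / 2 - r / 2) by ring, bodyA_shift]
      have hih := ih (c + r / 2) 0 0 le_rfl
      norm_num at hih
      rw [hih]
      simp only [pvSegVal, pvExtra]
      norm_num
      omega
    · by_cases h1 : x = -1 ∧ (r + k) % 2 = 1
      · obtain ⟨hx, hm⟩ := h1
        subst hx
        have hA : pvBodyA (c + (r + k) / 2, (r + k) % 2) (-1)
            = (c + (r + k) / 2, (r + k) % 2) := by
          simp [pvBodyA, hm]
        simp only [List.foldl_cons, hA]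
        have hrw := ih c (k + 1) (r + -1) (by omega)
        rw [show r + -1 + (k + 1) = r + k by ring] at hrw
        rw [hrw]
        simp only [pvSegVal, pvExtra]
        norm_num [hm]
      · have hc : ¬ (x + (r + k) % 2 = 0) := by
          intro hcc
          rcases (by omega : (r + k) % 2 = 0 ∨ (r + k) % 2 = 1) with h | h
          · rw [h] at hcc; omega
          · exact h1 ⟨by omega, h⟩
        have hA : pvBodyA (c + (r + k) / 2, (r + k) % 2) x
            = (c + (r + x + k) / 2, (r + x + k) % 2) := by
          simp only [pvBodyA, if_neg h0, if_pos hc, fd, md]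
          simp only [Prod.mk.injEq]
          exact ⟨by omega, by omega⟩
        simp only [List.foldl_cons, hA]
        have hrw := ih c k (r + x) hk
        rw [show r + x + k = r + (x + k) by ring] at hrw ⊢
        rw [hrw]
        simp only [pvSegVal, pvExtra, if_neg h0]
        rw [if_neg (fun hh => h1 ⟨hh.1, by omega⟩)]
        rw [show ((r + k) % 2 + x) % 2 = (r + (x + k)) % 2 by omega]

lemma extra_zero (L : List Int) : ∀ (m k r : Int), 0 ≤ k →
    pvBadSeg L m k r = false → pvExtra L m k r = 0 := by
  induction L with
  | nil =>
    intro m k r hk h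
    simp only [pvBadSeg, pvFlushBad] at h
    simp only [pvExtra]
    simp only [Bool.or_eq_false_iff, Bool.and_eq_false_iff, decide_eq_false_iff_not] at h
    rcases h with ⟨h1, h2 | h2⟩ <;> omega
  | cons x t ih =>
    intro m k r hk h
    simp only [pvBadSeg] at h
    simp only [pvExtra]
    split_ifs at h ⊢ with h0 h1
    · simp only [pvFlushBad, Bool.or_eq_false_iff] at h
      obtain ⟨hf, hrec⟩ := h
      simp only [decide_eq_false_iff_not, Bool.and_eq_false_iff] at hf
      have := ih 0 0 0 le_rfl hrec
      rcases hf with ⟨h1, h2⟩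
      rcases h2 with h2 | h2 <;> simp_all <;> omega
    · exact ih m (k+1) (r+x) (by omega) h
    · exact ih ((m+x)%2) k (r+x) hk h

lemma extra_nonneg (L : List Int) : ∀ (m k r : Int), 0 ≤ k → 0 ≤ pvExtra L m k r := by
  induction L with
  | nil => intro m k r hk; simp only [pvExtra]; omega
  | cons x t ih =>
    intro m k r hk
    simp only [pvExtra]
    split_ifs with h0 h1
    · have := ih 0 0 0 le_rfl; omega
    · exact ih m (k+1) (r+x) (by omega)
    · exact ih ((m+x)%2) k (r+x) hk

lemma extra_pos (L : List Int) : ∀ (m k r : Int), 0 ≤ k →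
    pvBadSeg L m k r = true → 0 < pvExtra L m k r := by
  induction L with
  | nil =>
    intro m k r hk h
    simp only [pvBadSeg, pvFlushBad, Bool.or_eq_true, decide_eq_true_eq,
      Bool.and_eq_true] at h
    simp only [pvExtra]
    rcases h with h | ⟨h1, h2⟩ <;> omega
  | cons x t ih =>
    intro m k r hk h
    simp only [pvBadSeg] at h
    simp only [pvExtra]
    split_ifs at h ⊢ with h0 h1
    · simp only [pvFlushBad, Bool.or_eq_true, decide_eq_true_eq, Bool.and_eq_true] at h
      have hnn := extra_nonneg t 0 0 0 le_rfl
      rcases h with (h | ⟨h1, h2⟩) | hrec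
      · omega
      · omega
      · have := ih 0 0 0 le_rfl hrec; omega
    · exact ih m (k+1) (r+x) (by omega) h
    · exact ih ((m+x)%2) k (r+x) hk h

-- an index loop 'for i in range(N): … A[i] …' equals an element fold over A's first N elements
lemma fold_range_take (A : List Int) (N : Int) (h0 : 0 ≤ N) (h1 : N ≤ A.length)
    (f : Int × Int → Int → Int × Int) (init : Int × Int) :
    (PySem.List.pyRange 0 N 1).foldl
      (fun st i => f st (PySem.List.pyGetD A i 0)) init
      = (A.take N.toNat).foldl f init := by
  have hlen : ((A.take N.toNat).length : Int) = N := by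
    simp [List.length_take]; omega
  have hcongr : (PySem.List.pyRange 0 N 1).foldl
      (fun st i => f st (PySem.List.pyGetD A i 0)) init
      = (PySem.List.pyRange 0 ((A.take N.toNat).length : Int) 1).foldl
        (fun st i => f st (PySem.List.pyGetD (A.take N.toNat) i 0)) init := by
    rw [hlen]
    refine PySem.List.foldl_congr_mem _ _ _ _ (fun st i hi => ?_)
    rw [PySem.List.mem_pyRange_one] at hi
    have hi0 : 0 ≤ i := hi.1
    have hiN : i < N := hi.2
    have e1 : PySem.List.pyGetD A i 0 = A[i.toNat] :=
      PySem.List.pyGetD_eq_getElem A 0 hi0 (by omega)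
    have hi2 : i.toNat < (A.take N.toNat).length := by simp [List.length_take]; omega
    have e2 : PySem.List.pyGetD (A.take N.toNat) i 0 = (A.take N.toNat)[i.toNat] :=
      PySem.List.pyGetD_eq_getElem _ 0 hi0 (by omega)
    rw [e1, e2, List.getElem_take]
  rw [hcongr, PySem.List.foldl_pyRange_zero_pyGetD' (A.take N.toNat) 0 f init]

lemma drop_nil_of_ge (N : Int) (A : List Int) (i : Int) (h0 : 0 ≤ i) (hge : N ≤ i) :
    (A.take N.toNat).drop i.toNat = [] := by
  apply List.drop_eq_nil_of_le
  have := List.length_take_le N.toNat A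
  omega

lemma prefix_cons (N : Int) (A : List Int) (i : Int) (h0 : 0 ≤ i) (hiN : i < N)
    (hNA : N ≤ A.length) :
    (A.take N.toNat).drop i.toNat
      = PySem.List.pyGetD A i 0 :: (A.take N.toNat).drop (i.toNat + 1) := by
  have hlen : (A.take N.toNat).length = N.toNat := by
    rw [List.length_take]; omega
  have hi : i.toNat < (A.take N.toNat).length := by omega
  rw [List.drop_eq_getElem_cons hi]
  congr 1
  rw [List.getElem_take]
  exact (PySem.List.pyGetD_eq_getElem A 0 h0 (by omega)).symm

-- B's inner loop sums exactly the leading nonzero run of the remaining prefix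
lemma run_spec (N : Int) (A : List Int) (hNA : N ≤ A.length) :
    ∀ (fuel : Nat) (i s : Int), 0 ≤ i →
      (((A.take N.toNat).drop i.toNat).takeWhile (fun x => x ≠ 0)).length ≤ fuel →
      pvRun N A fuel i s
        = (s + (((A.take N.toNat).drop i.toNat).takeWhile (fun x => x ≠ 0)).sum,
           i + (((A.take N.toNat).drop i.toNat).takeWhile (fun x => x ≠ 0)).length) := by
  intro fuel
  induction fuel with
  | zero =>
    intro i s h0 hf
    have hw : (((A.take N.toNat).drop i.toNat).takeWhile (fun x => x ≠ 0)) = [] :=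
      List.eq_nil_of_length_eq_zero (by omega)
    rw [hw]
    simp [pvRun]
  | succ f ih =>
    intro i s h0 hf
    by_cases hiN : i < N
    · have hpc := prefix_cons N A i h0 hiN hNA
      by_cases hx0 : PySem.List.pyGetD A i 0 = 0
      · have htw : ((A.take N.toNat).drop i.toNat).takeWhile (fun x => x ≠ 0) = [] := by
          rw [hpc, List.takeWhile_cons, if_neg (by simp [hx0])]
        rw [htw]
        simp [pvRun, hiN, hx0]
      · have hit : (i + 1).toNat = i.toNat + 1 := by omega
        have htw : ((A.take N.toNat).drop i.toNat).takeWhile (fun x => x ≠ 0)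
            = PySem.List.pyGetD A i 0
              :: ((A.take N.toNat).drop (i + 1).toNat).takeWhile (fun x => x ≠ 0) := by
          rw [hpc, List.takeWhile_cons, if_pos (by simp [hx0]), hit]
        rw [htw] at hf ⊢
        simp only [List.length_cons] at hf
        have hrec := ih (i + 1) (s + PySem.List.pyGetD A i 0) (by omega) (by omega)
        have hstep : pvRun N A (f + 1) i s
            = pvRun N A f (i + 1) (s + PySem.List.pyGetD A i 0) := by
          simp [pvRun, hiN, hx0]
        rw [hstep, hrec]
        simp only [List.sum_cons, List.length_cons, Prod.mk.injEq]
        constructor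
        · ring
        · push_cast; ring
    · have hw : (A.take N.toNat).drop i.toNat = [] := drop_nil_of_ge N A i h0 (by omega)
      rw [hw]
      simp [pvRun, hiN]

-- splitting the reference value at the first run
lemma segVal_split (L : List Int) : ∀ (s : Int),
    pvSegVal L s
      = (s + (L.takeWhile (fun x => x ≠ 0)).sum) / 2
        + pvSegVal (L.drop ((L.takeWhile (fun x => x ≠ 0)).length + 1)) 0 := by
  induction L with
  | nil => intro s; simp [pvSegVal]
  | cons x t ih =>
    intro s
    by_cases h0 : x = 0
    · subst h0
      simp [pvSegVal]
    · simp only [pvSegVal, if_neg h0, List.takeWhile_cons, decide_eq_true_eq]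
      rw [if_pos h0]
      simp only [List.length_cons, List.sum_cons]
      rw [ih (s + x)]
      rw [show ∀ n : Nat, List.drop (n + 1) (x :: t) = List.drop n t from fun n => List.drop_succ_cons]
      ring_nf

-- B's outer loop computes the reference value of the remaining prefix
lemma outer_spec (N : Int) (A : List Int) (hNA : N ≤ A.length) :
    ∀ (fuel : Nat) (i acc : Int), 0 ≤ i → (N - i).toNat + 1 ≤ fuel →
      pvOuter N A fuel i acc = acc + pvSegVal ((A.take N.toNat).drop i.toNat) 0 := by
  intro fuel
  induction fuel with
  | zero => intro i acc h0 hf; omega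
  | succ f ih =>
    intro i acc h0 hf
    by_cases hiN : i < N
    · have hMlen : ((A.take N.toNat).drop i.toNat).length ≤ (N - i).toNat := by
        rw [List.length_drop, List.length_take]; omega
      have hwle : (((A.take N.toNat).drop i.toNat).takeWhile (fun x => x ≠ 0)).length
          ≤ ((A.take N.toNat).drop i.toNat).length := (List.takeWhile_sublist _).length_le
      have hrun := run_spec N A hNA f i 0 h0 (by omega)
      have hstep : pvOuter N A (f + 1) i acc
          = pvOuter N A f ((pvRun N A f i 0).2 + 1)
              (acc + PySem.Int.floordiv (pvRun N A f i 0).1 2) := by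
        simp only [pvOuter, if_pos hiN]
      rw [hstep, hrun]
      simp only
      have hrec := ih
        (i + ((((A.take N.toNat).drop i.toNat).takeWhile (fun x => x ≠ 0)).length : Int) + 1)
        (acc + PySem.Int.floordiv
          (0 + (((A.take N.toNat).drop i.toNat).takeWhile (fun x => x ≠ 0)).sum) 2)
        (by omega) (by omega)
      rw [hrec]
      have hdrop : (A.take N.toNat).drop
            ((i + ((((A.take N.toNat).drop i.toNat).takeWhile (fun x => x ≠ 0)).length : Int) + 1).toNat)
          = ((A.take N.toNat).drop i.toNat).drop
              ((((A.take N.toNat).drop i.toNat).takeWhile (fun x => x ≠ 0)).length + 1) := by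
        rw [List.drop_drop]
        congr 1
        omega
      rw [hdrop, PySem.Int.floordiv_eq_ediv_of_pos (by omega),
        segVal_split ((A.take N.toNat).drop i.toNat) 0]
      omega
    · simp only [pvOuter, if_neg hiN]
      rw [drop_nil_of_ge N A i h0 (by omega)]
      simp [pvSegVal]

-- both ports, written over the prefix L = A.take N.toNat
lemma ports_eq (N : Int) (A : List Int) (hNA : N ≤ A.length) :
    max_card_pairs N A = pvSegVal (A.take N.toNat) 0 + pvExtra (A.take N.toNat) 0 0 0
    ∧ max_card_pairs_alt N A = pvSegVal (A.take N.toNat) 0 := by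
  constructor
  · unfold max_card_pairs
    by_cases h0 : 0 ≤ N
    · rw [fold_range_take A N h0 hNA]
      have := coreA (A.take N.toNat) 0 0 0 le_rfl
      norm_num at this
      rw [this]
    · rw [PySem.List.pyRange_one_eq_nil (by omega)]
      rw [show N.toNat = 0 by omega]
      simp [pvSegVal, pvExtra]
  · unfold max_card_pairs_alt
    have := outer_spec N A hNA (N.toNat + 1) 0 0 le_rfl (by omega)
    simpa using this

-- ===== VERDICT (by name: the statements are the Claim_ definitions above) =====
theorem max_card_pairs_spec : Claim_unchanged_max_card_pairs := by
  intro N A _ hPre hD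
  obtain ⟨hA, hB⟩ := ports_eq N A hPre
  unfold D_max_card_pairs at hD
  rw [hA, hB, extra_zero _ 0 0 0 le_rfl (by simpa using hD), add_zero]

theorem max_card_pairs_changed : Claim_changed_max_card_pairs := by
  unfold Claim_changed_max_card_pairs; decide

theorem max_card_pairs_tight : Claim_exact_max_card_pairs := by
  intro N A _ hPre hD
  obtain ⟨hA, hB⟩ := ports_eq N A hPre
  unfold D_max_card_pairs at hD
  have := extra_pos (A.take N.toNat) 0 0 0 le_rfl hD
  omega
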